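-- pv_equiv track=rewrite | github.com/robmackenzie/cineplex_seat_finder | main.py | longest_false_streak
-- ===== SOURCE A (Python) =====
-- def longest_false_streak(lst):
--     max_streak = 0
--     current_streak = 0
--
--     for item in lst:
--         if item is False:
--             current_streak += 1
--         else:
--             max_streak = max(max_streak, current_streak)
--             current_streak = 0
--
--     # In case the longest streak is at the end of the list
--     max_streak = max(max_streak, current_streak)
--     return max_streak
-- ===== SOURCE B (Python) =====
-- def longest_false_streak(lst):
--     best = 0
--     i = 0
--     n = len(lst)
--     while i < n:
--         j = i
--         while j < n and lst[j] is False: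
--             j += 1
--         best = max(best, j - i)
--         i = j + 1
--     return best
-- ===== Notes on version B (the rewrite author's own statement) =====
-- stated objective: alternative
-- what changed: Replaces A's per-element max_streak/current_streak accumulator with a run-at-a-time two-index scan: an outer loop positions i at each run start, an inner scan advances j over the run of Falses, and the best run length j-i is kept.
import Mathlib
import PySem

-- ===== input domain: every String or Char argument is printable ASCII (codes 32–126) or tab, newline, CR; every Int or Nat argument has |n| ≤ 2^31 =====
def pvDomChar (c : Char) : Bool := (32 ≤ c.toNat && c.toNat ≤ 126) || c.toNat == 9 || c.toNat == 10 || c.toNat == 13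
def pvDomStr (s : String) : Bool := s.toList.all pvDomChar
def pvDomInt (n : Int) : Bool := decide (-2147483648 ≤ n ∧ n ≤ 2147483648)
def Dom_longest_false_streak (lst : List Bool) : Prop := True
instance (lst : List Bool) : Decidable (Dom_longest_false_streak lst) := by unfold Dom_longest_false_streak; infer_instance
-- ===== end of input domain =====

-- B replaces A's running max/current accumulator with a run-at-a-time two-index scan (same O(n) cost, different decomposition).

-- ===== PORT A =====
-- A's for-loop over (max_streak, current_streak) as a foldl, then the trailing max.
def longest_false_streak (lst : List Bool) : Int :=
  let s := lst.foldl
    (fun (st : Int × Int) item =>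
      if item = false then (st.1, st.2 + 1) else (max st.1 st.2, 0))
    (0, 0)
  max s.1 s.2

-- ===== PORT B =====
-- B's 'while i < len(lst) and lst[i] is False: i += 1' counts the leading run of False.
def pvLead : List Bool → Nat
  | false :: t => pvLead t + 1
  | _ => 0


-- outer loop over runs: i is the run start, j scans the run (j = i + leading-False count of lst.drop i)
def pvAltGo (lst : List Bool) (best : Int) (i : Nat) : Int :=
  if _h : i < lst.length then
    let j := i + pvLead (lst.drop i)
    pvAltGo lst (max best ((j : Int) - (i : Int))) (j + 1)
  else best
termination_by lst.length - i

def longest_false_streak_alt (lst : List Bool) : Int :=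
  pvAltGo lst 0 0

-- ===== PRECONDITION & SPEC =====
def Spec_longest_false_streak (lst : List Bool) (out : Int) : Prop := out = longest_false_streak_alt lst
instance (lst : List Bool) (out : Int) : Decidable (Spec_longest_false_streak lst out) := by unfold Spec_longest_false_streak; infer_instance

-- ===== CLAIM (what is proved, stated in full; the proofs are below) =====
def Claim_equal_longest_false_streak : Prop := ∀ (lst : List Bool), Dom_longest_false_streak lst → Spec_longest_false_streak lst (longest_false_streak lst)

-- ===== LEMMAS AND PROOFS =====
theorem pvLead_le (l : List Bool) : pvLead l ≤ l.length := by
  induction l with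
  | nil => simp [pvLead]
  | cons b t ih => cases b <;> simp [pvLead] <;> omega

-- Reference function: g l = (longest False streak of l, length of l's leading False run).
def pvG : List Bool → Int × Int
  | [] => (0, 0)
  | b :: t =>
    let p := pvG t
    if b = false then (max p.1 (p.2 + 1), p.2 + 1) else (p.1, 0)

theorem pvG_bounds (l : List Bool) : 0 ≤ (pvG l).2 ∧ (pvG l).2 ≤ (pvG l).1 := by
  induction l with
  | nil => simp [pvG]
  | cons b t ih => cases b <;> simp [pvG] <;> omega

theorem pvG_snd_eq_lead (l : List Bool) : (pvG l).2 = (pvLead l : Int) := by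
  induction l with
  | nil => simp [pvG, pvLead]
  | cons b t ih => cases b <;> simp [pvG, pvLead, ih]

theorem longest_false_streak_fold (l : List Bool) (m c : Int) (hm : 0 ≤ m) (hc : 0 ≤ c) :
    max (l.foldl
        (fun (st : Int × Int) item =>
          if item = false then (st.1, st.2 + 1) else (max st.1 st.2, 0))
        (m, c)).1
      (l.foldl
        (fun (st : Int × Int) item =>
          if item = false then (st.1, st.2 + 1) else (max st.1 st.2, 0))
        (m, c)).2 = max (max m (pvG l).1) (c + (pvG l).2) := by
  induction l generalizing m c with
  | nil => simp [pvG]; omega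
  | cons b t ih =>
    have hb := pvG_bounds t
    cases b
    · simp only [List.foldl_cons, reduceIte]
      rw [ih m (c + 1) hm (by omega)]
      simp [pvG]
      omega
    · rw [List.foldl_cons,
        show (if (true = false) then (((m, c) : Int × Int).1, ((m, c) : Int × Int).2 + 1)
              else (max ((m, c) : Int × Int).1 ((m, c) : Int × Int).2, 0))
          = ((max m c : Int), (0 : Int)) from rfl,
        ih (max m c) 0 (by omega) le_rfl]
      simp [pvG]
      omega

theorem pvG_fst_eq (n : Nat) : ∀ t : List Bool, t.length ≤ n →
    (pvG t).1 = max (pvLead t : Int) (pvG (t.drop (pvLead t + 1))).1 := by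
  induction n with
  | zero =>
    intro t ht
    have : t = [] := List.eq_nil_of_length_eq_zero (by omega)
    subst this
    simp [pvG, pvLead]
  | succ n ih =>
    intro t ht
    match t with
    | [] => simp [pvG, pvLead]
    | true :: tt =>
      have := pvG_bounds tt
      simp [pvG, pvLead]
      omega
    | false :: tt =>
      have hb := pvG_bounds (tt.drop (pvLead tt + 1))
      have := ih tt (by simpa using ht)
      have hs := pvG_snd_eq_lead tt
      simp only [pvG, pvLead, List.drop_succ_cons]
      push_cast
      omega

theorem pvAltGo_eq (n : Nat) : ∀ (lst : List Bool) (best : Int) (i : Nat),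
    0 ≤ best → lst.length - i ≤ n →
    pvAltGo lst best i = max best (pvG (lst.drop i)).1 := by
  induction n with
  | zero =>
    intro lst best i hb hn
    rw [pvAltGo, dif_neg (by omega)]
    rw [List.drop_eq_nil_of_le (by omega)]
    simp [pvG]
    omega
  | succ n ih =>
    intro lst best i hb hn
    by_cases h : i < lst.length
    · rw [pvAltGo, dif_pos h]
      have hL := pvLead_le (lst.drop i)
      rw [ih lst _ _ (by omega) (by simp; omega)]
      have hdd : (lst.drop i).drop (pvLead (lst.drop i) + 1)
          = lst.drop (i + pvLead (lst.drop i) + 1) := by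
        rw [List.drop_drop]
        ring_nf
      have := pvG_fst_eq (lst.drop i).length (lst.drop i) le_rfl
      rw [hdd] at this
      have hb2 := pvG_bounds (lst.drop (i + pvLead (lst.drop i) + 1))
      push_cast
      omega
    · rw [pvAltGo, dif_neg h]
      rw [List.drop_eq_nil_of_le (by omega)]
      simp [pvG]
      omega

-- ===== VERDICT (by name: the statement is the Claim_ definition above) =====
theorem longest_false_streak_spec : Claim_equal_longest_false_streak := by
  intro lst _
  unfold Spec_longest_false_streak longest_false_streak longest_false_streak_alt
  rw [pvAltGo_eq lst.length lst 0 0 le_rfl (by omega), List.drop_zero,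
    longest_false_streak_fold lst 0 0 le_rfl le_rfl]
  have := pvG_bounds lst
  omega
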